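-- pv_equiv track=rewrite | github.com/crazedd0ge/gtnhnotes | tablecleanup.py | clean_markdown_table
-- ===== SOURCE A (Python) =====
-- def clean_markdown_table(table_text):
--     # Split the table into lines
--     lines = table_text.strip().split('\n')
--
--     # Remove completely empty lines
--     lines = [line for line in lines if line.strip()]
--
--     # Function to split row, respecting potential markdown formatting
--     def split_table_row(line):
--         # Remove leading/trailing pipes and split
--         cells = [cell.strip() for cell in line.strip('|').split('|')]
--         return cells
--
--     # Parse lines
--     parsed_lines = [split_table_row(line) for line in lines]
--
--     # Identify non-empty columns
--     non_empty_columns = []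
--     for col_index in range(len(parsed_lines[0])):
--         # Check if any row in this column has non-empty content
--         if any(row[col_index].strip() and row[col_index].strip() != '-----' for row in parsed_lines):
--             non_empty_columns.append(col_index)
--
--     # Filter rows to keep only non-empty columns
--     filtered_lines = []
--     for row in parsed_lines:
--         filtered_row = [row[i] for i in non_empty_columns]
--         filtered_lines.append(filtered_row)
--
--     # Create output lines
--     output_lines = []
--
--     # First line is the header
--     header = filtered_lines[0]
--     output_lines.append('| ' + ' | '.join(header) + ' |')
--
--     # Alignment line with proper alignment
--     alignment = [':---'] * len(header)
--     output_lines.append('| ' + ' | '.join(alignment) + ' |')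
--
--     # Rest of the rows
--     for row in filtered_lines[1:]:
--         output_lines.append('| ' + ' | '.join(row) + ' |')
--
--     return '\n'.join(output_lines)
-- ===== SOURCE B (Python) =====
-- def clean_markdown_table(table_text):
--     # Column-major rewrite: materialize columns, keep the non-empty ones, transpose back.
--     lines = [line for line in table_text.strip().split('\n') if line.strip()]
--     parsed = [[cell.strip() for cell in line.strip('|').split('|')] for line in lines]
--     columns = [[row[i] for row in parsed] for i in range(len(parsed[0]))]
--     kept = [col for col in columns if any(c.strip() and c.strip() != '-----' for c in col)]
--     rows = [[col[r] for col in kept] for r in range(len(parsed))]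
--     body = ['| ' + ' | '.join(row) + ' |' for row in rows]
--     align = '| ' + ' | '.join([':---'] * len(kept)) + ' |'
--     return '\n'.join([body[0], align] + body[1:])
-- ===== Notes on version B (the rewrite author's own statement) =====
-- stated objective: alternative
-- what changed: A keeps a list of surviving column indices and re-indexes every row through it; B materializes the table column-major (an explicit transpose), filters the column lists themselves, and transposes the kept columns back into rows.
import Mathlib
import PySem

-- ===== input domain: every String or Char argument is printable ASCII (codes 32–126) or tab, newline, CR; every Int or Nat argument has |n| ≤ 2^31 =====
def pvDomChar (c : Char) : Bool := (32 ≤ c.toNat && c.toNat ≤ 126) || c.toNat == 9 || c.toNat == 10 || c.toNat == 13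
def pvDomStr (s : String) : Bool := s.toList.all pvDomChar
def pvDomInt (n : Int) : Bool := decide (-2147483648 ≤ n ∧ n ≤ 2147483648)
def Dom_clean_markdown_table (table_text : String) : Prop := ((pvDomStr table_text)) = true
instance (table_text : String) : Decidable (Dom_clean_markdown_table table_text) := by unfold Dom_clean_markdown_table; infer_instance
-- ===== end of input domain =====

-- B replaces A's surviving-column-index list by an explicit column-major transpose (filter the columns, transpose back); same cost, alternative structure. Return value only; neither program mutates its argument.

-- ===== PORT A =====
-- split_table_row: strip outer pipes, split on '|', strip each cell ('|' ≠ "" so split? is some)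
def pvSplitTableRow (line : String) : List String :=
  ((PySem.Str.split? (PySem.Str.stripChars line "|") "|").getD []).map (fun cell => PySem.Str.strip cell)

def clean_markdown_table (table_text : String) : String :=
  let lines := ((PySem.Str.split? (PySem.Str.strip table_text) "\n").getD []).filter
      (fun line => PySem.Str.strip line != "")
  let parsed := lines.map (fun line => pvSplitTableRow line)
  -- parsed_lines[0] raises IndexError on an all-blank input; Pre_ excludes it (default [] unused inside Pre_)
  let nonEmpty := (PySem.List.pyRange 0 (PySem.List.len (PySem.List.pyGetD parsed 0 []))).foldl
      (fun acc i =>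
        -- row[col_index] raises IndexError on a row shorter than the first; Pre_ excludes those (default "" unused inside Pre_)
        if parsed.any (fun row =>
            PySem.Str.strip (PySem.List.pyGetD row i "") != "" &&
            PySem.Str.strip (PySem.List.pyGetD row i "") != "-----")
        then acc ++ [i] else acc) []
  let filtered := parsed.foldl
      (fun acc row => acc ++ [nonEmpty.map (fun i => PySem.List.pyGetD row i "")]) []
  let header := PySem.List.pyGetD filtered 0 []
  let out := ["| " ++ PySem.Str.join " | " header ++ " |"]
  let out := out ++ ["| " ++ PySem.Str.join " | "
      (PySem.List.pyRepeat [":---"] (PySem.List.len header)) ++ " |"]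
  let out := (PySem.List.slice filtered (some 1)).foldl
      (fun acc row => acc ++ ["| " ++ PySem.Str.join " | " row ++ " |"]) out
  PySem.Str.join "\n" out

-- ===== PORT B =====
def clean_markdown_table_alt (table_text : String) : String :=
  let parsed := (((PySem.Str.split? (PySem.Str.strip table_text) "\n").getD []).filter
      (fun line => PySem.Str.strip line != "")).map
      (fun line => ((PySem.Str.split? (PySem.Str.stripChars line "|") "|").getD []).map
        (fun cell => PySem.Str.strip cell))
  let columns := (PySem.List.pyRange 0 (PySem.List.len (PySem.List.pyGetD parsed 0 []))).map
      (fun i => parsed.map (fun row => PySem.List.pyGetD row i ""))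
  let kept := columns.filter (fun col => col.any (fun c =>
      PySem.Str.strip c != "" && PySem.Str.strip c != "-----"))
  let rows := (PySem.List.pyRange 0 (PySem.List.len parsed)).map
      (fun r => kept.map (fun col => PySem.List.pyGetD col r ""))
  let body := rows.map (fun row => "| " ++ PySem.Str.join " | " row ++ " |")
  let align := "| " ++ PySem.Str.join " | "
      (PySem.List.pyRepeat [":---"] (PySem.List.len kept)) ++ " |"
  PySem.Str.join "\n" ([PySem.List.pyGetD body 0 ""] ++ [align] ++ PySem.List.slice body (some 1))

-- ===== PRECONDITION & SPEC =====
-- cell count of one table line, as both Pythons parse it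
def pvCellCount (line : String) : Nat :=
  ((PySem.Str.split? (PySem.Str.stripChars line "|") "|").getD []).length

-- Pre_: at least one non-blank line (else A's parsed_lines[0] raises IndexError), and no line has
-- fewer cells than the first (else A's row[col_index] / row[i] raises IndexError). Exactly the
-- inputs on which the Python A returns normally; no returning input is excluded.
def Pre_clean_markdown_table (table_text : String) : Prop :=
  let lines := ((PySem.Str.split? (PySem.Str.strip table_text) "\n").getD []).filter
      (fun line => PySem.Str.strip line != "")
  lines ≠ [] ∧ ∀ l ∈ lines, pvCellCount (lines.headD "") ≤ pvCellCount l

instance (table_text : String) : Decidable (Pre_clean_markdown_table table_text) := by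
  unfold Pre_clean_markdown_table; infer_instance

def pvWitness_clean_markdown_table : String := "| a |  |\n| b |  |"

def Spec_clean_markdown_table (table_text : String) (out : String) : Prop :=
  out = clean_markdown_table_alt table_text
instance (table_text : String) (out : String) : Decidable (Spec_clean_markdown_table table_text out) := by
  unfold Spec_clean_markdown_table; infer_instance

-- ===== CLAIM (what is proved, stated in full; the proofs are below) =====
def Claim_equal_clean_markdown_table : Prop := ∀ (table_text : String), Dom_clean_markdown_table table_text → Pre_clean_markdown_table table_text → Spec_clean_markdown_table table_text (clean_markdown_table table_text)

-- ===== LEMMAS AND PROOFS =====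

-- transposed lookup: cell r of column i is cell i of row r (out of range gives "" on both sides)
theorem pvColGet (P : List (List String)) (i r : Int) :
    PySem.List.pyGetD (P.map (fun row => PySem.List.pyGetD row i "")) r ""
      = PySem.List.pyGetD (PySem.List.pyGetD P r []) i "" := by
  have h := PySem.List.pyGetD_map (fun row => PySem.List.pyGetD row i "") P r []
  simpa [PySem.List.pyGetD, PySem.List.pyGet?, PySem.List.pyIdx?] using h

theorem pvGetD_cons_zero {α : Type} (x : α) (xs : List α) (d : α) :
    PySem.List.pyGetD (x :: xs) 0 d = x := by
  simp [PySem.List.pyGetD, PySem.List.pyGet?, PySem.List.pyIdx?]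

-- xs[1:] on a cons cell drops the head
theorem pvSliceOneCons {α : Type} (x : α) (xs : List α) :
    PySem.List.slice (x :: xs) (some 1) = xs := by
  simpa using PySem.List.slice_from (xs := x :: xs) (a := 1) (by norm_num)

-- transposing the kept columns back row-by-row rebuilds the row-major filtered table
theorem pvBodyEq (P : List (List String)) (nE : List Int) :
    List.map (fun r => "| " ++ PySem.Str.join " | "
        (List.map (fun i => PySem.List.pyGetD (PySem.List.pyGetD P r []) i "") nE) ++ " |")
      (PySem.List.pyRange 0 (PySem.List.len P))
    = P.map (fun row => "| " ++ PySem.Str.join " | "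
        (List.map (fun i => PySem.List.pyGetD row i "") nE) ++ " |") := by
  conv_rhs => rw [← PySem.List.map_pyGetD_pyRange_zero P ([] : List String), List.map_map]
  rfl

-- the core equality, on the parsed (nonempty) table
theorem pvCoreEq (hd : List String) (tl : List (List String)) :
    (let parsed := hd :: tl
     let nonEmpty := (PySem.List.pyRange 0 (PySem.List.len (PySem.List.pyGetD parsed 0 []))).foldl
        (fun acc i =>
          if parsed.any (fun row =>
              PySem.Str.strip (PySem.List.pyGetD row i "") != "" &&
              PySem.Str.strip (PySem.List.pyGetD row i "") != "-----")
          then acc ++ [i] else acc) []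
     let filtered := parsed.foldl
        (fun acc row => acc ++ [nonEmpty.map (fun i => PySem.List.pyGetD row i "")]) []
     let header := PySem.List.pyGetD filtered 0 []
     let out := ["| " ++ PySem.Str.join " | " header ++ " |"]
     let out := out ++ ["| " ++ PySem.Str.join " | "
        (PySem.List.pyRepeat [":---"] (PySem.List.len header)) ++ " |"]
     let out := (PySem.List.slice filtered (some 1)).foldl
        (fun acc row => acc ++ ["| " ++ PySem.Str.join " | " row ++ " |"]) out
     PySem.Str.join "\n" out)
    =
    (let parsed := hd :: tl
     let columns := (PySem.List.pyRange 0 (PySem.List.len (PySem.List.pyGetD parsed 0 []))).map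
        (fun i => parsed.map (fun row => PySem.List.pyGetD row i ""))
     let kept := columns.filter (fun col => col.any (fun c =>
        PySem.Str.strip c != "" && PySem.Str.strip c != "-----"))
     let rows := (PySem.List.pyRange 0 (PySem.List.len parsed)).map
        (fun r => kept.map (fun col => PySem.List.pyGetD col r ""))
     let body := rows.map (fun row => "| " ++ PySem.Str.join " | " row ++ " |")
     let align := "| " ++ PySem.Str.join " | "
        (PySem.List.pyRepeat [":---"] (PySem.List.len kept)) ++ " |"
     PySem.Str.join "\n" ([PySem.List.pyGetD body 0 ""] ++ [align] ++ PySem.List.slice body (some 1))) := by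
  simp only [pvGetD_cons_zero, PySem.List.foldl_append_if_eq_filter,
    PySem.List.foldl_append_singleton_eq_map, List.nil_append,
    List.filter_map, List.any_map, Function.comp_def, List.map_map, pvColGet]
  rw [pvBodyEq]
  simp only [List.map_cons, pvGetD_cons_zero,
    pvSliceOneCons, List.map_map, Function.comp_def,
    PySem.List.len_eq, List.length_map, List.cons_append, List.nil_append]

theorem clean_markdown_table_spec : Claim_equal_clean_markdown_table := by
  intro t _ hpre
  unfold Spec_clean_markdown_table clean_markdown_table clean_markdown_table_alt
  obtain ⟨hne, -⟩ := hpre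
  obtain ⟨l, ls, hL⟩ := List.exists_cons_of_ne_nil hne
  rw [hL]
  simp only [pvSplitTableRow, List.map_cons]
  exact pvCoreEq _ _
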